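-- pv_equiv track=rewrite | github.com/PeterLuschny/tabl | src/tabl.py | SeqString
-- ===== SOURCE A (Python) =====
-- def SeqString(
--     seq: list[int], maxchars: int, maxterms: int, sep: str = " ", offset: int = 0
-- ) -> str:
--     """
--     Converts a sequence of integers into a string representation.
--     Args:
--         seq (list[int]): The sequence of integers to be converted.
--         maxchars (int): The maximum length of the resulting string.
--         maxterms (int): The maximum number of terms included.
--         sep (string, optional): String seperator. Default is ' '.
--         offset (int, optional): The starting index of the sequence. Defaults to 0.
--     Returns:
--         str: The string representation of the sequence.
--     """
--     seqstr = ""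
--     maxt = maxl = 0
--     for trm in seq[offset:]:
--         maxt += 1
--         if maxt > maxterms:
--             break
--         s = str(trm) + sep
--         maxl += len(s)
--         if maxl > maxchars:
--             break
--         seqstr += s
--     return seqstr
-- ===== SOURCE B (Python) =====
-- import itertools
-- import bisect
--
--
-- def SeqString(
--     seq: list[int], maxchars: int, maxterms: int, sep: str = " ", offset: int = 0
-- ) -> str:
--     terms = seq[offset:][: max(maxterms, 0)]
--     prefix = list(itertools.accumulate(len(str(t)) + len(sep) for t in terms))
--     idx = bisect.bisect_right(prefix, maxchars)
--     return "".join(str(t) + sep for t in terms[:idx])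
-- ===== Notes on version B (the rewrite author's own statement) =====
-- stated objective: alternative
-- what changed: Replaces A's sequential accumulate-and-break loop with a materialized parts list, a cumulative-length prefix table (itertools.accumulate) and a bisect_right binary-search cutoff followed by a slice-join.
import Mathlib
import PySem

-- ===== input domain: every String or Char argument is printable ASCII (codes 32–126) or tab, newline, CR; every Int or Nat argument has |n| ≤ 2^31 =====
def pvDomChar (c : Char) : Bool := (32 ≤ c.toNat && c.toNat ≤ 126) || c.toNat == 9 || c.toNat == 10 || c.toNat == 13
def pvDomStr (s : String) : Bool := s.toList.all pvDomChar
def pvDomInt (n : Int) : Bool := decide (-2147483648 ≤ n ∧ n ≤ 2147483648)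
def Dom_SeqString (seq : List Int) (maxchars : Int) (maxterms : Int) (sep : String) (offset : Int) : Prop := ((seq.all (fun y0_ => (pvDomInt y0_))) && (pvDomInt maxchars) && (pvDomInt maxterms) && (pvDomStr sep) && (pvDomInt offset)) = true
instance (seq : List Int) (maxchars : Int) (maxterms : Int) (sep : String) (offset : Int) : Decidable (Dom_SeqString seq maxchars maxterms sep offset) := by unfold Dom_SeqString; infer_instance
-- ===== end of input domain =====

-- B replaces A's accumulate-and-break loop by a parts list, a cumulative-length prefix table and a
-- bisect_right binary-search cutoff followed by a slice-join (alternative decomposition, same cost class).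

-- ===== PORT A =====
-- the 'for trm in seq[offset:]' loop with its two breaks; state = (seqstr, maxt, maxl)
def seqStringLoop (sep : String) (maxchars maxterms : Int) :
    List Int → String → Int → Int → String
  | [], seqstr, _, _ => seqstr
  | trm :: rest, seqstr, maxt, maxl =>
    let maxt' := maxt + 1
    if maxt' > maxterms then seqstr
    else
      let s := PySem.Int.toStr trm ++ sep
      let maxl' := maxl + PySem.Str.len s
      if maxl' > maxchars then seqstr
      else seqStringLoop sep maxchars maxterms rest (seqstr ++ s) maxt' maxl'

def SeqString (seq : List Int) (maxchars : Int) (maxterms : Int) (sep : String) (offset : Int) : String :=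
  seqStringLoop sep maxchars maxterms (PySem.List.slice seq (some offset) none) "" 0 0

-- ===== PORT B =====
-- itertools.accumulate of the part lengths (running sums)
def pyAccumulate : List Int → Int → List Int
  | [], _ => []
  | x :: xs, acc => (acc + x) :: pyAccumulate xs (acc + x)

def SeqString_alt (seq : List Int) (maxchars : Int) (maxterms : Int) (sep : String) (offset : Int) : String :=
  -- terms = seq[offset:][:max(maxterms, 0)]
  let terms := PySem.List.slice (PySem.List.slice seq (some offset) none) none (some (max maxterms 0))
  -- prefix = list(itertools.accumulate(len(str(t)) + len(sep) for t in terms))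
  let pfx := pyAccumulate (terms.map (fun t => PySem.Str.len (PySem.Int.toStr t) + PySem.Str.len sep)) 0
  -- idx = bisect.bisect_right(prefix, maxchars)
  let idx := PySem.List.bisectRight pfx maxchars
  -- return "".join(str(t) + sep for t in terms[:idx])
  PySem.Str.join "" ((PySem.List.slice terms none (some (idx : Int))).map (fun t => PySem.Int.toStr t ++ sep))

-- ===== PRECONDITION & SPEC =====
def Spec_SeqString (seq : List Int) (maxchars : Int) (maxterms : Int) (sep : String) (offset : Int) (out : String) : Prop := out = SeqString_alt seq maxchars maxterms sep offset
instance (seq : List Int) (maxchars : Int) (maxterms : Int) (sep : String) (offset : Int) (out : String) : Decidable (Spec_SeqString seq maxchars maxterms sep offset out) := by unfold Spec_SeqString; infer_instance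

-- ===== CLAIM (what is proved, stated in full; the proofs are below) =====
def Claim_equal_SeqString : Prop := ∀ (seq : List Int) (maxchars : Int) (maxterms : Int) (sep : String) (offset : Int), Dom_SeqString seq maxchars maxterms sep offset → Spec_SeqString seq maxchars maxterms sep offset (SeqString seq maxchars maxterms sep offset)

-- ===== LEMMAS AND PROOFS =====

-- reference truncation, term-count and char budgets as explicit parameters
def trunc (sep : String) : List Int → Int → Int → String
  | [], _, _ => ""
  | t :: rest, mt, mc =>
    if mt < 1 then ""
    else
      let s := PySem.Int.toStr t ++ sep
      if mc < PySem.Str.len s then ""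
      else s ++ trunc sep rest (mt - 1) (mc - PySem.Str.len s)

-- chars-only reference truncation
def truncC (sep : String) : List Int → Int → String
  | [], _ => ""
  | t :: rest, mc =>
    let s := PySem.Int.toStr t ++ sep
    if mc < PySem.Str.len s then ""
    else s ++ truncC sep rest (mc - PySem.Str.len s)

theorem seqStringLoop_eq_trunc (sep : String) (mc mt : Int) :
    ∀ (l : List Int) (acc : String) (maxt maxl : Int),
      seqStringLoop sep mc mt l acc maxt maxl = acc ++ trunc sep l (mt - maxt) (mc - maxl) := by
  intro l
  induction l with
  | nil => intro acc maxt maxl; simp [seqStringLoop, trunc]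
  | cons t rest ih =>
    intro acc maxt maxl
    simp only [seqStringLoop, trunc]
    by_cases h1 : maxt + 1 > mt
    · rw [if_pos h1, if_pos (show mt - maxt < 1 by omega)]; simp
    · rw [if_neg h1, if_neg (show ¬(mt - maxt < 1) by omega)]
      by_cases h2 : maxl + PySem.Str.len (PySem.Int.toStr t ++ sep) > mc
      · rw [if_pos h2, if_pos (show mc - maxl < PySem.Str.len (PySem.Int.toStr t ++ sep) by omega)]
        simp
      · rw [if_neg h2, if_neg (show ¬(mc - maxl < PySem.Str.len (PySem.Int.toStr t ++ sep)) by omega),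
          ih, show mt - (maxt + 1) = mt - maxt - 1 by omega,
          show mc - (maxl + PySem.Str.len (PySem.Int.toStr t ++ sep)) = mc - maxl - PySem.Str.len (PySem.Int.toStr t ++ sep) by omega,
          String.append_assoc]

theorem trunc_eq_truncC (sep : String) :
    ∀ (l : List Int) (mt mc : Int),
      trunc sep l mt mc = truncC sep (l.take (max mt 0).toNat) mc := by
  intro l
  induction l with
  | nil => intro mt mc; simp [trunc, truncC]
  | cons t rest ih =>
    intro mt mc
    by_cases h : mt < 1
    · have : (max mt 0).toNat = 0 := by omega
      simp [trunc, this, truncC, if_pos h]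
    · have : (max mt 0).toNat = (max (mt - 1) 0).toNat + 1 := by omega
      rw [this]
      simp only [trunc, truncC, List.take_succ_cons, if_neg h]
      rw [ih]

theorem pyAccumulate_shift (xs : List Int) :
    ∀ (a b : Int), pyAccumulate xs (a + b) = (pyAccumulate xs b).map (a + ·) := by
  induction xs with
  | nil => intro a b; simp [pyAccumulate]
  | cons x xs ih =>
    intro a b
    simp only [pyAccumulate, List.map_cons, List.cons.injEq]
    refine ⟨by ring, ?_⟩
    rw [show a + b + x = a + (b + x) by ring]
    exact ih a (b + x)

theorem length_pyAccumulate (xs : List Int) : ∀ (a : Int), (pyAccumulate xs a).length = xs.length := by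
  induction xs with
  | nil => intro a; simp [pyAccumulate]
  | cons x xs ih => intro a; simp [pyAccumulate, ih]

theorem le_of_mem_pyAccumulate (xs : List Int) :
    ∀ (a : Int), (∀ x ∈ xs, 0 ≤ x) → ∀ y ∈ pyAccumulate xs a, a ≤ y := by
  induction xs with
  | nil => intro a _ y hy; simp [pyAccumulate] at hy
  | cons x xs ih =>
    intro a hnn y hy
    simp only [pyAccumulate, List.mem_cons] at hy
    have hx : 0 ≤ x := hnn x (by simp)
    rcases hy with rfl | hy
    · omega
    · have := ih (a + x) (fun z hz => hnn z (by simp [hz])) y hy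
      omega

theorem pairwise_pyAccumulate (xs : List Int) :
    ∀ (a : Int), (∀ x ∈ xs, 0 ≤ x) → (pyAccumulate xs a).Pairwise (· ≤ ·) := by
  induction xs with
  | nil => intro a _; simp [pyAccumulate]
  | cons x xs ih =>
    intro a hnn
    simp only [pyAccumulate, List.pairwise_cons]
    refine ⟨fun y hy => le_of_mem_pyAccumulate xs (a + x) (fun z hz => hnn z (by simp [hz])) y hy,
      ih (a + x) (fun z hz => hnn z (by simp [hz]))⟩

theorem join_empty_cons (x : String) (xs : List String) :
    PySem.Str.join "" (x :: xs) = x ++ PySem.Str.join "" xs := by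
  cases xs with
  | nil => simp [PySem.Str.join, PySem.Chars.join_singleton, PySem.Chars.join_nil]
  | cons y ys => simp [PySem.Str.join, PySem.Chars.join_cons_cons]

-- any k with the bisect_right split property on the prefix table yields the char-truncated join
theorem getD_pyAccumulate (xs : List Int) (a : Int) (j : Nat) (hj : j < xs.length) :
    (pyAccumulate xs a).getD j 0 = a + (pyAccumulate xs 0).getD j 0 := by
  have h := pyAccumulate_shift xs a 0
  rw [add_zero] at h
  rw [h, List.getD_eq_getElem _ _ (by rw [List.length_map, length_pyAccumulate]; exact hj),
    List.getElem_map, List.getD_eq_getElem _ _ (by rw [length_pyAccumulate]; exact hj)]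

theorem join_take_eq_truncC (sep : String) :
    ∀ (l : List Int) (mc : Int) (k : Nat),
      (k ≤ l.length) →
      (∀ j, j < l.length → j < k →
        (pyAccumulate ((l.map (fun t => PySem.Int.toStr t ++ sep)).map PySem.Str.len) 0).getD j 0 ≤ mc) →
      (∀ j, j < l.length → k ≤ j →
        mc < (pyAccumulate ((l.map (fun t => PySem.Int.toStr t ++ sep)).map PySem.Str.len) 0).getD j 0) →
      PySem.Str.join "" ((l.map (fun t => PySem.Int.toStr t ++ sep)).take k) = truncC sep l mc := by
  intro l
  induction l with
  | nil =>
    intro mc k hk _ _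
    have hk0 : k = 0 := by simpa using hk
    subst hk0
    simp [truncC, PySem.Str.join, PySem.Chars.join_nil]
  | cons t rest ih =>
    intro mc k hk hle hgt
    set s := PySem.Int.toStr t ++ sep with hs
    have hacc : pyAccumulate (((t :: rest).map (fun t => PySem.Int.toStr t ++ sep)).map PySem.Str.len) 0
        = (0 + PySem.Str.len s) :: pyAccumulate ((rest.map (fun t => PySem.Int.toStr t ++ sep)).map PySem.Str.len) (0 + PySem.Str.len s) := rfl
    by_cases hmc : mc < PySem.Str.len s
    · -- first part already overflows: k must be 0
      have hk0 : k = 0 := by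
        by_contra h
        have h0 := hle 0 (by simp) (by omega)
        rw [hacc, List.getD_cons_zero] at h0
        omega
      subst hk0
      simp only [List.take_zero, truncC]
      rw [← hs, if_pos hmc]
      simp [PySem.Str.join, PySem.Chars.join_nil]
    · -- first part fits: k ≥ 1, recurse
      have hk1 : 1 ≤ k := by
        by_contra h
        have h0 := hgt 0 (by simp) (by omega)
        rw [hacc, List.getD_cons_zero] at h0
        omega
      obtain ⟨k', rfl⟩ : ∃ k', k = k' + 1 := ⟨k - 1, by omega⟩
      simp only [List.map_cons, List.take_succ_cons]
      rw [join_empty_cons]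
      have hlen2 : ∀ j : Nat, j < rest.length →
          ((rest.map (fun t => PySem.Int.toStr t ++ sep)).map PySem.Str.len).length > j := by
        intro j hj; simpa using hj
      rw [ih (mc - PySem.Str.len s) k' (by simpa using hk)
        (by
          intro j hj hjk
          have h1 := hle (j + 1) (by simpa using hj) (by omega)
          rw [hacc, List.getD_cons_succ, getD_pyAccumulate _ _ _ (by simpa using hj)] at h1
          omega)
        (by
          intro j hj hjk
          have h1 := hgt (j + 1) (by simpa using hj) (by omega)
          rw [hacc, List.getD_cons_succ, getD_pyAccumulate _ _ _ (by simpa using hj)] at h1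
          omega)]
      simp only [truncC]
      rw [← hs, if_neg hmc]

theorem len_nonneg (s : String) : 0 ≤ PySem.Str.len s := by
  rw [PySem.Str.len_eq]; positivity

-- ===== VERDICT (by name: the statement is the Claim_ definition above) =====
theorem SeqString_spec : Claim_equal_SeqString := by
  intro seq maxchars maxterms sep offset _
  unfold Spec_SeqString SeqString SeqString_alt
  rw [seqStringLoop_eq_trunc]
  simp only [sub_zero]
  rw [trunc_eq_truncC]
  rw [PySem.List.slice_to _ (by omega : (0:Int) ≤ max maxterms 0)]
  generalize (PySem.List.slice seq (some offset) none).take (max maxterms 0).toNat = l'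
  have hlens : l'.map (fun t => PySem.Str.len (PySem.Int.toStr t) + PySem.Str.len sep)
      = (l'.map (fun t => PySem.Int.toStr t ++ sep)).map PySem.Str.len := by
    simp [List.map_map, Function.comp]
  rw [hlens]
  have hsorted :
      (pyAccumulate ((l'.map (fun t => PySem.Int.toStr t ++ sep)).map PySem.Str.len) 0).Pairwise (· ≤ ·) := by
    apply pairwise_pyAccumulate
    intro x hx
    simp only [List.map_map, List.mem_map, Function.comp] at hx
    obtain ⟨t, _, rfl⟩ := hx
    exact len_nonneg _
  have hlen : (pyAccumulate ((l'.map (fun t => PySem.Int.toStr t ++ sep)).map PySem.Str.len) 0).length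
      = l'.length := by
    rw [length_pyAccumulate]; simp
  obtain ⟨hklen, hle, hgt⟩ := PySem.List.bisectRight_spec _ maxchars hsorted
  rw [PySem.List.slice_to_natCast, List.map_take, String.empty_append]
  exact (join_take_eq_truncC sep l' maxchars _ (by omega)
    (fun j hj hjk => by
      rw [List.getD_eq_getElem _ _ (by omega)]
      exact hle j (by omega) hjk)
    (fun j hj hjk => by
      rw [List.getD_eq_getElem _ _ (by omega)]
      exact hgt j (by omega) hjk)).symm
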